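-- pv_equiv track=rewrite | github.com/rafaelri/coding-challenge-solutions | path-max-min/path_max_min.py | max_of_min
-- ===== SOURCE A (Python) =====
-- def get_next(matrix, pos, h, w):
--     moves = [(pos[0], pos[1]+1), (pos[0]+1, pos[1])]
--     return list(filter( lambda xy: xy[0]<h and xy[1]<w, moves ))
--
-- def max_of_min(matrix, position, h, w, min_value):
--     next_pos = get_next(matrix, position, h, w)
--     if not next_pos:
--         return min_value
--     else:
--         def next_min(pos):
--             val_pos = matrix[pos[0]][pos[1]]
--             new_min = val_pos if val_pos < min_value else min_value
--             return max_of_min(matrix, pos, h, w, new_min)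
--         minuses = map(next_min, next_pos)
--         return max(minuses)
-- ===== SOURCE B (Python) =====
-- # Bottom-up DP: best[c] = max over right/down paths from (r,c) of the min of
-- # the values strictly after (r,c); answer = min(min_value, best at position).
-- def max_of_min(matrix, position, h, w, min_value):
--     r0, c0 = position[0], position[1]
--     if not (r0 < h and c0 + 1 < w) and not (r0 + 1 < h and c0 < w):
--         return min_value            # no right/down move exists from the start position
--     cur = None      # DP row for the row below the one being built (None at the bottom row)
--     bvals = None    # matrix values (first w columns) of the row below
--     for r in range(h - 1, r0 - 1, -1):
--         vals = matrix[r][:w]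
--         n = len(vals)
--         nxt = [None] * n
--         for c in range(n - 1, -1, -1):
--             cands = []
--             if c + 1 < n:
--                 right = nxt[c + 1]
--                 cands.append(vals[c + 1] if right is None else min(vals[c + 1], right))
--             if cur is not None:
--                 down = cur[c]
--                 cands.append(bvals[c] if down is None else min(bvals[c], down))
--             if cands:
--                 nxt[c] = max(cands)
--         cur, bvals = nxt, vals
--     b = cur[c0]
--     return min_value if b is None else min(min_value, b)
-- ===== Notes on version B (the rewrite author's own statement) =====
-- stated objective: faster
-- what changed: A explores every right/down path recursively (exponential in h+w); B computes one bottom-up DP row at a time (best-onward value per cell, max of min) and reads off the answer at the start position.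
-- outside the precondition, e.g. on max_of_min([[1, 2], [3, 4]], (0, -1), 2, 2, 5): A returns 3, B returns 4
import Mathlib
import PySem

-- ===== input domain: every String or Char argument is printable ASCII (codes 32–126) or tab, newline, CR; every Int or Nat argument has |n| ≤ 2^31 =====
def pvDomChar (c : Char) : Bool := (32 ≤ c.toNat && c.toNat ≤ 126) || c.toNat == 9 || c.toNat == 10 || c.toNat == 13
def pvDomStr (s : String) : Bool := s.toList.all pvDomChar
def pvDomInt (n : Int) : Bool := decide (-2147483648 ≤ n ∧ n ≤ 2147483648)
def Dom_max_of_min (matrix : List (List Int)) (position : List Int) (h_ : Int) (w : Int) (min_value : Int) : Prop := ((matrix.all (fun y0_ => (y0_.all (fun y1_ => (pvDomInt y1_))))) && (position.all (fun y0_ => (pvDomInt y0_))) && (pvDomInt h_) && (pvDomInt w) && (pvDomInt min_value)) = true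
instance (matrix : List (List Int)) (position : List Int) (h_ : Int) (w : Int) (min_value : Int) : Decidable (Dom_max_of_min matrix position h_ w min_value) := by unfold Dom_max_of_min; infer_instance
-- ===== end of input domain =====

-- B replaces A's exponential path recursion by a bottom-up DP over the grid rows (max of min), one row at a time.

-- ===== PORT A =====
-- get_next(matrix, pos, h, w): matrix is unused by the Python helper, so it is not a parameter here
def pvGetNext (pos : Int × Int) (h w : Int) : List (Int × Int) :=
  [(pos.1, pos.2 + 1), (pos.1 + 1, pos.2)].filter (fun xy => decide (xy.1 < h) && decide (xy.2 < w))

-- recursive body of A; matrix[pos[0]][pos[1]] is pyGet? (default 0 only where Python raises, excluded by Pre_)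
def pvMaxOfMinA (matrix : List (List Int)) (pos : Int × Int) (h w min_value : Int) : Int :=
  let next := pvGetNext pos h w
  if next = [] then min_value
  else
    let minuses := next.attach.map (fun p =>
      let val_pos := ((PySem.List.pyGet? ((PySem.List.pyGet? matrix p.1.1).getD []) p.1.2)).getD 0
      let new_min := if val_pos < min_value then val_pos else min_value
      pvMaxOfMinA matrix p.1 h w new_min)
    match minuses with
    | [] => min_value   -- unreachable: next ≠ []
    | x :: xs => xs.foldl max x
termination_by ((h - pos.1) + (w - pos.2)).toNat
decreasing_by
  all_goals
    have hp : (p : Int × Int) ∈ pvGetNext pos h w := p.2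
    simp only [pvGetNext, List.mem_filter, List.mem_cons, Bool.and_eq_true, decide_eq_true_eq, List.not_mem_nil, or_false] at hp
    obtain ⟨hmem, h1, h2⟩ := hp
    rcases hmem with h3 | h3 <;> rw [h3] at h1 h2 ⊢ <;> simp at h1 h2 ⊢ <;> omega

def max_of_min (matrix : List (List Int)) (position : List Int) (h_ : Int) (w : Int) (min_value : Int) : Int :=
  pvMaxOfMinA matrix (((PySem.List.pyGet? position 0).getD 0), ((PySem.List.pyGet? position 1).getD 0)) h_ w min_value

-- ===== PORT B =====
-- min of a step value v with an optional best-onward b (None = no further cells)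
def pvComb (v : Int) (b : Option Int) : Int :=
  match b with
  | none => v
  | some x => min v x

-- one DP row, built right-to-left (Source B's inner loop); below = (bvals, cur) when there is a row below
def pvRow (vals : List Int) (below : Option (List Int × List (Option Int))) : List (Option Int) :=
  match vals, below with
  | [], _ => []
  | _ :: vrest, none =>
      let rest := pvRow vrest none
      (match vrest, rest with
       | rv :: _, rb :: _ => some (pvComb rv rb)
       | _, _ => none) :: rest
  | _ :: vrest, some (bv :: bvrest, bb :: bbrest) =>
      let rest := pvRow vrest (some (bvrest, bbrest))
      (some (match vrest, rest with
       | rv :: _, rb :: _ => max (pvComb rv rb) (pvComb bv bb)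
       | _, _ => pvComb bv bb)) :: rest
  | _ :: _, some _ => []   -- ragged below row: Python would raise; excluded by Pre_

-- one iteration of Source B's row loop; state = (cur, bvals), None before the bottom row
def pvStep (matrix : List (List Int)) (w : Int) (st : Option (List (Option Int) × List Int)) (r : Int) : Option (List (Option Int) × List Int) :=
  let vals := PySem.List.slice ((PySem.List.pyGet? matrix r).getD []) none (some w)
  some (pvRow vals (match st with | none => none | some (cur, bvals) => some (bvals, cur)), vals)

def max_of_min_alt (matrix : List (List Int)) (position : List Int) (h_ : Int) (w : Int) (min_value : Int) : Int :=
  let r0 := (PySem.List.pyGet? position 0).getD 0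
  let c0 := (PySem.List.pyGet? position 1).getD 0
  if ¬(r0 < h_ ∧ c0 + 1 < w) ∧ ¬(r0 + 1 < h_ ∧ c0 < w) then min_value
  else
    match (PySem.List.pyRange (h_ - 1) (r0 - 1) (-1)).foldl (pvStep matrix w) none with
    | none => min_value   -- loop body never ran: unreachable given the guard; Python raises there
    | some (cur, _) =>
        match (PySem.List.pyGet? cur c0).getD none with
        | none => min_value
        | some bv => min min_value bv

-- ===== PRECONDITION & SPEC =====
-- Pre_ admits: any input whose start position has no in-grid successor (A returns min_value without
-- touching the matrix), and any start position inside the h x w grid with enough rows/columns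
-- (rows above position[0] are never read). It excludes inputs on which A raises (position shorter
-- than 2, a visited row shorter than w, fewer than h rows) and inputs with a move whose index is
-- negative, where A's value is an accident of Python's negative-index wraparound.
def Pre_max_of_min (matrix : List (List Int)) (position : List Int) (h_ : Int) (w : Int) (min_value : Int) : Prop :=
  2 ≤ position.length ∧
  ((¬(position.getD 0 0 < h_ ∧ position.getD 1 0 + 1 < w) ∧
    ¬(position.getD 0 0 + 1 < h_ ∧ position.getD 1 0 < w)) ∨
   (0 ≤ position.getD 0 0 ∧ position.getD 0 0 < h_ ∧
    0 ≤ position.getD 1 0 ∧ position.getD 1 0 < w ∧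
    h_ ≤ (matrix.length : Int) ∧
    ∀ i : Nat, i < h_.toNat → (position.getD 0 0).toNat ≤ i → w ≤ ((matrix.getD i []).length : Int)))
instance (matrix : List (List Int)) (position : List Int) (h_ : Int) (w : Int) (min_value : Int) : Decidable (Pre_max_of_min matrix position h_ w min_value) := by unfold Pre_max_of_min; infer_instance

def pvWitness_max_of_min : List (List Int) × List Int × Int × Int × Int := ([[1, 2], [3, 4]], [0, 0], 2, 2, 5)

def Spec_max_of_min (matrix : List (List Int)) (position : List Int) (h_ : Int) (w : Int) (min_value : Int) (out : Int) : Prop := out = max_of_min_alt matrix position h_ w min_value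
instance (matrix : List (List Int)) (position : List Int) (h_ : Int) (w : Int) (min_value : Int) (out : Int) : Decidable (Spec_max_of_min matrix position h_ w min_value out) := by unfold Spec_max_of_min; infer_instance

-- ===== CLAIM (what is proved, stated in full; the proofs are below) =====
def Claim_equal_max_of_min : Prop := ∀ (matrix : List (List Int)) (position : List Int) (h_ : Int) (w : Int) (min_value : Int), Dom_max_of_min matrix position h_ w min_value → Pre_max_of_min matrix position h_ w min_value → Spec_max_of_min matrix position h_ w min_value (max_of_min matrix position h_ w min_value)

-- ===== LEMMAS AND PROOFS =====

-- matrix[r][c] as both ports read it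
def pvValAt (matrix : List (List Int)) (r c : Int) : Int :=
  (PySem.List.pyGet? ((PySem.List.pyGet? matrix r).getD []) c).getD 0

-- specification DP cell: max over right/down paths from (r,c) of the min of values strictly after (r,c); none = no move
def pvBest (matrix : List (List Int)) (h w r c : Int) : Option Int :=
  if hR : r < h ∧ c + 1 < w then
    if hD : r + 1 < h ∧ c < w then
      some (max (pvComb (pvValAt matrix r (c+1)) (pvBest matrix h w r (c+1)))
                (pvComb (pvValAt matrix (r+1) c) (pvBest matrix h w (r+1) c)))
    else
      some (pvComb (pvValAt matrix r (c+1)) (pvBest matrix h w r (c+1)))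
  else if hD : r + 1 < h ∧ c < w then
    some (pvComb (pvValAt matrix (r+1) c) (pvBest matrix h w (r+1) c))
  else none
termination_by ((h - r) + (w - c)).toNat
decreasing_by all_goals omega

def pvValsAt (matrix : List (List Int)) (w r : Int) : List Int :=
  PySem.List.slice ((PySem.List.pyGet? matrix r).getD []) none (some w)

-- row DP values after k+1 processed rows (bottom row is h-1)
def pvRowK (matrix : List (List Int)) (h w : Int) : Nat → List (Option Int)
  | 0 => pvRow (pvValsAt matrix w (h-1)) none
  | k+1 => pvRow (pvValsAt matrix w (h-1-(k+1))) (some (pvValsAt matrix w (h-1-k), pvRowK matrix h w k))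
theorem pvA_char (matrix : List (List Int)) (h w : Int) :
    ∀ (n : Nat) (r c : Int), ((h - r) + (w - c)).toNat ≤ n → r < h → c < w → ∀ m,
      pvMaxOfMinA matrix (r, c) h w m = pvComb m (pvBest matrix h w r c) := by
  intro n
  induction n with
  | zero =>
    intro r c hle hr hc m
    exact absurd hle (by omega)
  | succ n ih =>
    intro r c hle hr hc m
    rw [pvMaxOfMinA]
    by_cases hP : c + 1 < w <;> by_cases hQ : r + 1 < h
    case pos =>
      simp only [pvGetNext]
      rw [List.filter_cons_of_pos (by simp [hr, hP]), List.filter_cons_of_pos (by simp [hQ, hc])]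
      simp only [List.filter_nil]
      rw [if_neg (by simp)]
      simp only [List.attach, List.attachWith, List.pmap, List.map]
      rw [ih r (c+1) (by omega) hr hP, ih (r+1) c (by omega) hQ hc]
      conv_rhs => rw [pvBest]
      rw [dif_pos ⟨hr, hP⟩, dif_pos ⟨hQ, hc⟩]
      simp only [List.foldl]
      cases pvBest matrix h w r (c+1) <;> cases pvBest matrix h w (r+1) c <;>
        simp only [pvComb, pvValAt] <;> split_ifs <;> omega
    case neg =>
      -- hP, ¬hQ
      simp only [pvGetNext]
      rw [List.filter_cons_of_pos (by simp [hr, hP]), List.filter_cons_of_neg (by simp [hQ])]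
      simp only [List.filter_nil]
      rw [if_neg (by simp)]
      simp only [List.attach, List.attachWith, List.pmap, List.map]
      rw [ih r (c+1) (by omega) hr hP]
      conv_rhs => rw [pvBest]
      rw [dif_pos ⟨hr, hP⟩, dif_neg (by omega)]
      simp only [List.foldl]
      cases pvBest matrix h w r (c+1) <;>
        simp only [pvComb, pvValAt] <;> split_ifs <;> omega
    case pos =>
      -- ¬hP, hQ
      simp only [pvGetNext]
      rw [List.filter_cons_of_neg (by simp [hP]), List.filter_cons_of_pos (by simp [hQ, hc])]
      simp only [List.filter_nil]
      rw [if_neg (by simp)]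
      simp only [List.attach, List.attachWith, List.pmap, List.map]
      rw [ih (r+1) c (by omega) hQ hc]
      conv_rhs => rw [pvBest]
      rw [dif_neg (by omega), dif_pos ⟨hQ, hc⟩]
      simp only [List.foldl]
      cases pvBest matrix h w (r+1) c <;>
        simp only [pvComb, pvValAt] <;> split_ifs <;> omega
    case neg =>
      -- ¬hP, ¬hQ
      simp only [pvGetNext]
      rw [List.filter_cons_of_neg (by simp [hP]), List.filter_cons_of_neg (by simp [hQ])]
      simp only [List.filter_nil]
      rw [if_pos trivial]
      conv_rhs => rw [pvBest]
      rw [dif_neg (by omega), dif_neg (by omega)]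
      simp [pvComb]

theorem pvValsAt_eq (matrix : List (List Int)) (w r : Int) (hw : 0 ≤ w)
    (hr0 : 0 ≤ r) (hrh : r < (matrix.length : Int))
    (hrow : w ≤ ((matrix.getD r.toNat []).length : Int)) :
    pvValsAt matrix w r = (List.range w.toNat).map (fun j : Nat => pvValAt matrix r (j : Int)) := by
  have hrn : r.toNat < matrix.length := by omega
  have hget : (PySem.List.pyGet? matrix r).getD [] = matrix[r.toNat] := by
    rw [PySem.List.pyGet?_of_nonneg _ hr0]
    simp [List.getElem?_eq_getElem hrn]
  have hlenrow : w.toNat ≤ matrix[r.toNat].length := by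
    have h2 := hrow
    rw [List.getD_eq_getElem?_getD, List.getElem?_eq_getElem hrn] at h2
    simp at h2
    omega
  unfold pvValsAt
  rw [hget, PySem.List.slice_to _ hw]
  apply List.ext_getElem
  · simp [List.length_take]; omega
  · intro i h1 h2
    simp only [List.getElem_take, List.getElem_map, List.getElem_range]
    have hi : i < matrix[r.toNat].length := by simp [List.length_take] at h1; omega
    simp only [pvValAt, hget]
    simp [PySem.List.pyGet?_natCast, List.getElem?_eq_getElem hi]

theorem range_map_succ {α : Type} (n : Nat) (f : Nat → α) :
    (List.range (n+1)).map f = f 0 :: (List.range n).map (fun j => f (j+1)) := by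
  rw [List.range_succ_eq_map, List.map_cons, List.map_map]
  rfl

theorem pvRow_cons_none (v : Int) (vrest : List Int) :
    pvRow (v :: vrest) none = (match vrest, pvRow vrest none with
      | rv :: _, rb :: _ => some (pvComb rv rb)
      | _, _ => none) :: pvRow vrest none := rfl

theorem pvRow_none_spec (matrix : List (List Int)) (h w r : Int) (hr : r < h) (hr2 : ¬ r + 1 < h) :
    ∀ (vals : List Int) (k : Nat), (k + vals.length = w.toNat) →
      (∀ (i : Nat) (hi : i < vals.length), vals[i] = pvValAt matrix r ((k : Int) + (i : Int))) →
      pvRow vals none = (List.range vals.length).map (fun j : Nat => pvBest matrix h w r ((k : Int) + (j : Int))) := by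
  intro vals
  induction vals with
  | nil => intro k _ _; simp [pvRow]
  | cons v vrest ih =>
    intro k hk hvals
    have hk' : (k+1) + vrest.length = w.toNat := by simp at hk; omega
    have hvals' : ∀ (i : Nat) (hi : i < vrest.length), vrest[i] = pvValAt matrix r (((k+1 : Nat) : Int) + (i : Int)) := by
      intro i hi
      have h0 := hvals (i+1) (by simp; omega)
      simp only [List.getElem_cons_succ] at h0
      rw [h0]
      congr 1
      push_cast
      ring
    have hrest := ih (k+1) hk' hvals'
    cases vrest with
    | nil =>
      rw [show pvRow [v] none = [none] from rfl]
      simp only [List.length_cons, List.length_nil]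
      rw [range_map_succ]
      simp only [List.range_zero, List.map_nil]
      congr 1
      rw [pvBest, dif_neg (by simp at hk; omega), dif_neg (by omega)]
    | cons rv vr' =>
      simp only [List.length_cons] at hrest ⊢
      rw [range_map_succ] at hrest
      rw [pvRow_cons_none, hrest]
      rw [range_map_succ, range_map_succ]
      refine List.cons_eq_cons.mpr ⟨?_, List.cons_eq_cons.mpr ⟨?_, ?_⟩⟩
      · have hrv : rv = pvValAt matrix r ((k : Int) + 1) := by
          have h0 := hvals' 0 (by simp)
          simpa using h0
        conv_rhs => rw [pvBest]
        rw [dif_pos ⟨hr, by simp at hk'; omega⟩, dif_neg (by omega)]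
        rw [hrv]
        push_cast
        norm_num
      · push_cast
        norm_num
      · congr 1
        funext j
        congr 1
        push_cast
        ring

theorem pvRow_cons_some (v bv : Int) (vrest bvrest : List Int) (bb : Option Int) (bbrest : List (Option Int)) :
    pvRow (v :: vrest) (some (bv :: bvrest, bb :: bbrest)) =
      (some (match vrest, pvRow vrest (some (bvrest, bbrest)) with
        | rv :: _, rb :: _ => max (pvComb rv rb) (pvComb bv bb)
        | _, _ => pvComb bv bb)) :: pvRow vrest (some (bvrest, bbrest)) := rfl

theorem pvRow_some_spec (matrix : List (List Int)) (h w r : Int) (hr : r < h) (hq : r + 1 < h) :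
    ∀ (vals bvals : List Int) (brow : List (Option Int)) (k : Nat), (k + vals.length = w.toNat) →
      bvals.length = vals.length →
      brow = (List.range vals.length).map (fun j : Nat => pvBest matrix h w (r+1) ((k : Int) + (j : Int))) →
      (∀ (i : Nat) (hi : i < vals.length), vals[i] = pvValAt matrix r ((k : Int) + (i : Int))) →
      (∀ (i : Nat) (hi : i < bvals.length), bvals[i] = pvValAt matrix (r+1) ((k : Int) + (i : Int))) →
      pvRow vals (some (bvals, brow)) = (List.range vals.length).map (fun j : Nat => pvBest matrix h w r ((k : Int) + (j : Int))) := by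
  intro vals
  induction vals with
  | nil => intro bvals brow k _ _ _ _ _; simp [pvRow]
  | cons v vrest ih =>
    intro bvals brow k hk hblen hbrow hvals hbvals
    cases bvals with
    | nil => simp at hblen
    | cons bv bvrest =>
    simp only [List.length_cons] at hk hblen hbrow ⊢
    rw [range_map_succ] at hbrow
    have hbrow' : brow = pvBest matrix h w (r+1) ((k : Int) + ((0:Nat) : Int)) ::
        (List.range vrest.length).map (fun j : Nat => pvBest matrix h w (r+1) (((k+1 : Nat) : Int) + (j : Int))) := by
      rw [hbrow]
      congr 1
      apply List.map_congr_left
      intro j _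
      congr 1
      push_cast
      ring
    have hk' : (k+1) + vrest.length = w.toNat := by omega
    have hblen' : bvrest.length = vrest.length := by omega
    have hvals' : ∀ (i : Nat) (hi : i < vrest.length), vrest[i] = pvValAt matrix r (((k+1 : Nat) : Int) + (i : Int)) := by
      intro i hi
      have h0 := hvals (i+1) (by simp; omega)
      simp only [List.getElem_cons_succ] at h0
      rw [h0]; congr 1; push_cast; ring
    have hbvals' : ∀ (i : Nat) (hi : i < bvrest.length), bvrest[i] = pvValAt matrix (r+1) (((k+1 : Nat) : Int) + (i : Int)) := by
      intro i hi
      have h0 := hbvals (i+1) (by simp; omega)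
      simp only [List.getElem_cons_succ] at h0
      rw [h0]; congr 1; push_cast; ring
    have hrest := ih bvrest ((List.range vrest.length).map (fun j : Nat => pvBest matrix h w (r+1) (((k+1 : Nat) : Int) + (j : Int)))) (k+1) hk' hblen' rfl hvals' hbvals'
    subst hbrow'
    have hbv : bv = pvValAt matrix (r+1) ((k : Int) + ((0:Nat) : Int)) := by
      have h0 := hbvals 0 (by simp)
      simpa using h0
    rw [range_map_succ]
    cases vrest with
    | nil =>
      simp only [List.range_zero, List.map_nil, List.length_nil]
      rw [show pvRow [v] (some (bv :: bvrest, [pvBest matrix h w (r+1) ((k : Int) + ((0:Nat) : Int))]))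
            = [some (pvComb bv (pvBest matrix h w (r+1) ((k : Int) + ((0:Nat) : Int))))] from rfl]
      refine List.cons_eq_cons.mpr ⟨?_, rfl⟩
      conv_rhs => rw [pvBest]
      rw [dif_neg (by simp at hk; omega), dif_pos ⟨hq, by simp at hk; omega⟩]
      rw [hbv]
    | cons rv vr' =>
      simp only [List.length_cons] at hrest ⊢
      rw [pvRow_cons_some, hrest]
      have hrv : rv = pvValAt matrix r ((k : Int) + 1) := by
        have h0 := hvals 1 (by simp)
        simpa using h0
      rw [range_map_succ, range_map_succ]
      refine List.cons_eq_cons.mpr ⟨?_, List.cons_eq_cons.mpr ⟨?_, ?_⟩⟩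
      · conv_rhs => rw [pvBest]
        rw [dif_pos ⟨hr, by simp at hk; omega⟩, dif_pos ⟨hq, by simp at hk; omega⟩]
        rw [hbv, hrv]
        push_cast
        norm_num
      · push_cast; norm_num
      · congr 1
        funext j
        congr 1
        push_cast
        ring

theorem pvRowK_spec (matrix : List (List Int)) (h w r0 : Int)
    (hw : 0 < w) (hr0 : 0 ≤ r0) (hr0h : r0 < h) (hlen : h ≤ (matrix.length : Int))
    (hrows : ∀ i : Nat, i < h.toNat → r0.toNat ≤ i → w ≤ ((matrix.getD i []).length : Int)) :
    ∀ k : Nat, (k : Int) ≤ h - 1 - r0 →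
      pvRowK matrix h w k = (List.range w.toNat).map (fun j : Nat => pvBest matrix h w (h-1-(k : Int)) (j : Int)) := by
  intro k
  induction k with
  | zero =>
    intro hk
    have hv := pvValsAt_eq matrix w (h-1) (by omega) (by omega) (by omega)
      (hrows (h-1).toNat (by omega) (by omega))
    rw [pvRowK, hv]
    rw [pvRow_none_spec matrix h w (h-1) (by omega) (by omega) _ 0
      (by simp)
      (by intro i hi; simp at hi ⊢)]
    simp only [List.length_map, List.length_range]
    apply List.map_congr_left
    intro j _
    norm_num
  | succ k ih =>
    intro hk
    have ihk := ih (by omega)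
    have hvA := pvValsAt_eq matrix w (h-1-((k : Int)+1)) (by omega) (by omega) (by omega)
      (hrows (h-1-((k : Int)+1)).toNat (by omega) (by omega))
    have hvB := pvValsAt_eq matrix w (h-1-(k : Int)) (by omega) (by omega) (by omega)
      (hrows (h-1-(k : Int)).toNat (by omega) (by omega))
    rw [pvRowK]
    push_cast
    rw [hvA, hvB, ihk]
    have hreq : h-1-((k : Int)+1) + 1 = h-1-(k : Int) := by ring
    rw [pvRow_some_spec matrix h w (h-1-((k : Int)+1)) (by omega) (by omega)
      _ _ _ 0
      (by simp)
      (by simp)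
      (by rw [hreq]; simp only [List.length_map, List.length_range]; apply List.map_congr_left; intro j _; norm_num)
      (by intro i hi; simp at hi ⊢)
      (by intro i hi; rw [hreq]; simp at hi ⊢)]
    simp only [List.length_map, List.length_range]
    apply List.map_congr_left
    intro j _
    norm_num

theorem pvFold_eq (matrix : List (List Int)) (h w : Int) :
    ∀ (k : Nat) (r0 : Int), r0 = h - 1 - (k : Int) → 0 ≤ r0 →
      (PySem.List.pyRange (h - 1) (r0 - 1) (-1)).foldl (pvStep matrix w) none
        = some (pvRowK matrix h w k, pvValsAt matrix w r0) := by
  intro k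
  induction k with
  | zero =>
    intro r0 hr0 _
    have : r0 = h - 1 := by omega
    subst this
    rw [PySem.List.pyRange_neg_one_cons (by omega), PySem.List.pyRange_neg_one_eq_nil (by omega)]
    simp [pvStep, pvRowK, pvValsAt]
  | succ k ih =>
    intro r0 hr0 hr00
    rw [PySem.List.pyRange_neg_one_eq_reverse, PySem.List.pyRange_one_cons (by omega), List.reverse_cons,
      List.foldl_append, show r0 - 1 + 1 = r0 by ring, ← PySem.List.pyRange_neg_one_eq_reverse]
    rw [show PySem.List.pyRange (h-1) r0 (-1) = PySem.List.pyRange (h-1) ((r0+1) - 1) (-1) by norm_num]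
    rw [ih (r0+1) (by omega) (by omega)]
    simp only [List.foldl_cons, List.foldl_nil, pvStep]
    rw [pvRowK]
    rw [show h - 1 - ((k : Int) + 1) = r0 by omega, show h - 1 - (k : Int) = r0 + 1 by omega]
    rfl


-- ===== VERDICT (by name: the statement is the Claim_ definition above) =====
theorem max_of_min_spec : Claim_equal_max_of_min := by
  intro matrix position h w m _ hpre
  obtain ⟨hplen, hpre⟩ := hpre
  unfold Spec_max_of_min max_of_min max_of_min_alt
  dsimp only
  have h0 : (PySem.List.pyGet? position 0).getD 0 = position.getD 0 0 := by
    rw [PySem.List.pyGet?_zero, List.getD_eq_getElem?_getD]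
  have h1 : (PySem.List.pyGet? position 1).getD 0 = position.getD 1 0 := by
    rw [show (1:Int) = ((1:Nat):Int) by norm_num, PySem.List.pyGet?_natCast, List.getD_eq_getElem?_getD]
  rw [h0, h1]
  by_cases hnm : ¬(position.getD 0 0 < h ∧ position.getD 1 0 + 1 < w) ∧
      ¬(position.getD 0 0 + 1 < h ∧ position.getD 1 0 < w)
  · -- no in-grid successor: both sides return min_value
    rw [if_pos hnm, pvMaxOfMinA]
    simp only [pvGetNext]
    rw [List.filter_cons_of_neg (by simp only [Bool.and_eq_true, decide_eq_true_eq]; omega),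
      List.filter_cons_of_neg (by simp only [Bool.and_eq_true, decide_eq_true_eq]; omega)]
    simp only [List.filter_nil, if_pos trivial]
  · rw [if_neg hnm]
    rcases hpre with hpre | hpre
    · exact absurd hpre hnm
    obtain ⟨hp0, hp0h, hp1, hp1w, hmlen, hrows⟩ := hpre
    have hA := pvA_char matrix h w ((h - position.getD 0 0) + (w - position.getD 1 0)).toNat
      (position.getD 0 0) (position.getD 1 0) le_rfl hp0h hp1w m
    rw [hA]
    have hfold := pvFold_eq matrix h w (h - 1 - position.getD 0 0).toNat (position.getD 0 0) (by omega) hp0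
    rw [hfold]
    have hrk := pvRowK_spec matrix h w (position.getD 0 0) (by omega) hp0 hp0h hmlen hrows
      (h - 1 - position.getD 0 0).toNat (by omega)
    rw [show h - 1 - ((h - 1 - position.getD 0 0).toNat : Int) = position.getD 0 0 by omega] at hrk
    rw [hrk]
    dsimp only
    rw [PySem.List.pyGet?_of_nonneg _ hp1]
    have hc0n : (position.getD 1 0).toNat < w.toNat := by omega
    rw [List.getElem?_map, List.getElem?_range hc0n]
    simp only [Option.map_some, Option.getD_some]
    rw [show (((position.getD 1 0).toNat : Nat) : Int) = position.getD 1 0 from by omega]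
    cases pvBest matrix h w (position.getD 0 0) (position.getD 1 0) <;> rfl
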